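-- pv_equiv track=rewrite | github.com/thisbenrogers/cs-sprint-challenge-hash-tables | hashtables/ex4/ex4.py | has_negatives
-- ===== SOURCE A (Python) =====
-- def has_negatives(a):
--     """
--     YOUR CODE HERE
--     """
--     # Your code here
--     result = []
--     d = dict()
--     for i in a:
--         k = abs(i)
--         if k not in d:
--             d[k] = 1
--         else:
--             d[k] += 1
--     for k, v in d.items():
--         if v > 1:
--             result.append(k)
--     return result
-- ===== SOURCE B (Python) =====
-- def has_negatives(a):
--     # Pass 1: classify absolute values into first-sighting (seen) vs repeated (dup).
--     seen = set()
--     dup = set()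
--     for i in a:
--         k = abs(i)
--         if k in seen:
--             dup.add(k)
--         else:
--             seen.add(k)
--     # Pass 2: collect duplicated abs-values in first-occurrence order, deduplicated.
--     result = []
--     added = set()
--     for i in a:
--         k = abs(i)
--         if k in dup and k not in added:
--             added.add(k)
--             result.append(k)
--     return result
-- ===== Notes on version B (the rewrite author's own statement) =====
-- stated objective: alternative
-- what changed: Replaces A's count dictionary (count abs-values, then filter items with count>1) by two boolean set passes: seen/dup classification with no counts, then a deduplicating rescan of the original list collecting abs-values in dup in first-occurrence order.
import Mathlib
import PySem

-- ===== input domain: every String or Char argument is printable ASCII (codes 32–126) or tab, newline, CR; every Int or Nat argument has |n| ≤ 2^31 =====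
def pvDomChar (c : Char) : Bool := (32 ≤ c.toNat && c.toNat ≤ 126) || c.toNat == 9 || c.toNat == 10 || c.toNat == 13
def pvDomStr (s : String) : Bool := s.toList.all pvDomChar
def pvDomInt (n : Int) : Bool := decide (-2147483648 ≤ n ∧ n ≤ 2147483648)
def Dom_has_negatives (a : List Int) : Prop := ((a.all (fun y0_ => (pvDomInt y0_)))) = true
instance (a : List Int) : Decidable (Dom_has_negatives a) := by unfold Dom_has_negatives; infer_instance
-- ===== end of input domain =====

-- B replaces A's count dictionary by two set passes (seen/dup classification, then a
-- deduplicating rescan of the list); alternative decomposition, same asymptotic cost.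


-- ===== PORT A =====
def has_negatives (a : List Int) : List Int :=
  let d : PySem.Dict Int Int :=
    a.foldl (fun d i =>
      let k := |i|
      if d.contains k = false then d.insert k 1 else d.modify k 0 (· + 1))
      PySem.Dict.empty
  d.items.foldl (fun result kv => if kv.2 > 1 then result ++ [kv.1] else result) []

-- ===== PORT B =====
def has_negatives_alt (a : List Int) : List Int :=
  let sd : PySem.Set Int × PySem.Set Int :=
    a.foldl (fun p i =>
      let k := |i|
      if k ∈ p.1 then (p.1, PySem.Set.add p.2 k) else (PySem.Set.add p.1 k, p.2))
      (PySem.Set.empty, PySem.Set.empty)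
  (a.foldl (fun (p : PySem.Set Int × List Int) i =>
      let k := |i|
      if k ∈ sd.2 ∧ k ∉ p.1 then (PySem.Set.add p.1 k, p.2 ++ [k]) else p)
      (PySem.Set.empty, [])).2

-- ===== PRECONDITION & SPEC =====
def Spec_has_negatives (a : List Int) (out : List Int) : Prop := out = has_negatives_alt a
instance (a : List Int) (out : List Int) : Decidable (Spec_has_negatives a out) := by unfold Spec_has_negatives; infer_instance

-- ===== CLAIM (what is proved, stated in full; the proofs are below) =====
def Claim_equal_has_negatives : Prop := ∀ (a : List Int), Dom_has_negatives a → Spec_has_negatives a (has_negatives a)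

-- ===== LEMMAS AND PROOFS =====

-- A's counting step is Counter's step (on a missing key both append (k, 1)).
lemma stepA_eq_counter_step (d : PySem.Dict Int Int) (k : Int) :
    (if d.contains k = false then d.insert k 1 else d.modify k 0 (· + 1))
      = d.modify k 0 (· + 1) := by
  split_ifs with h
  · simp [PySem.Dict.modify, PySem.Dict.getD_of_not_contains _ _ h]
  · rfl

-- Membership in B's dup set after pass 1.
lemma mem_dup (m : List Int) (s₀ d₀ : PySem.Set Int) (x : Int) :
    x ∈ (m.foldl (fun p k =>
          if k ∈ p.1 then (p.1, PySem.Set.add p.2 k) else (PySem.Set.add p.1 k, p.2))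
          (s₀, d₀)).2
    ↔ x ∈ d₀ ∨ (x ∈ s₀ ∧ x ∈ m) ∨ 2 ≤ m.count x := by
  induction m generalizing s₀ d₀ with
  | nil => simp
  | cons k m ih =>
    simp only [List.foldl_cons]
    by_cases hk : k ∈ s₀
    · rw [if_pos hk, ih]
      by_cases hx : x = k
      · subst hx
        simp [PySem.Set.mem_add, hk]
      · simp [PySem.Set.mem_add, hx, Ne.symm hx]
    · rw [if_neg hk, ih]
      by_cases hx : x = k
      · subst hx
        have hcp : 0 < m.count x ↔ x ∈ m := List.count_pos_iff
        rcases Nat.lt_or_ge (m.count x) 1 with hc | hc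
        · have hm : x ∉ m := fun h => by have := hcp.mpr h; omega
          have h1 : ¬ 2 ≤ m.count x := by omega
          have h2 : ¬ 2 ≤ (x :: m).count x := by
            simp only [List.count_cons_self]; omega
          simp [hm, hk, h1]
        · have hm : x ∈ m := hcp.mp hc
          have h2 : 2 ≤ (x :: m).count x := by
            simp only [List.count_cons_self]; omega
          simp [hm, hk]
      · simp [PySem.Set.mem_add, hx, Ne.symm hx]

-- Pass 2 collects, in first-occurrence order, the abs-values lying in dup.
lemma pass2_eq (dup : PySem.Set Int) (m : List Int) (s₀ : PySem.Set Int) (r₀ : List Int) :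
    (m.foldl (fun (p : PySem.Set Int × List Int) k =>
        if k ∈ dup ∧ k ∉ p.1 then (PySem.Set.add p.1 k, p.2 ++ [k]) else p)
        (s₀, r₀)).2
    = r₀ ++ (PySem.Set.ofList m).filter (fun k => decide (k ∈ dup) && !decide (k ∈ s₀)) := by
  induction m generalizing s₀ r₀ with
  | nil => simp
  | cons k m ih =>
    simp only [List.foldl_cons, PySem.Set.ofList_cons]
    by_cases hc : k ∈ dup ∧ k ∉ s₀
    · rw [if_pos hc, ih]
      simp only [List.filter_cons, hc.1, hc.2, decide_true, decide_false, Bool.not_false,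
        Bool.and_self, List.append_assoc, List.singleton_append]
      congr 2
      simp only [PySem.Set.discard, List.filter_filter]
      apply List.filter_congr
      intro y _
      by_cases hy : y = k
      · subst hy; simp [PySem.Set.mem_add]
      · simp [PySem.Set.mem_add, hy]
    · rw [if_neg hc, ih]
      have hfk : (decide (k ∈ dup) && !decide (k ∈ s₀)) = false := by
        rcases not_and_or.mp hc with h | h
        · simp [h]
        · simp [not_not.mp h]
      simp only [List.filter_cons, hfk]
      simp only [Bool.false_eq_true, if_false]
      congr 1
      simp only [PySem.Set.discard, List.filter_filter]
      apply List.filter_congr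
      intro y hy
      by_cases hyk : y = k
      · subst hyk; simp [hfk]
      · simp [hyk]

-- ===== VERDICT (by name: the statement is the Claim_ definition above) =====
theorem has_negatives_spec : Claim_equal_has_negatives := by
  intro a _
  unfold Spec_has_negatives has_negatives has_negatives_alt
  simp only []
  -- fold over a with |i| = fold over m := a.map |·|
  have hmap : ∀ {σ : Type} (f : σ → Int → σ) (init : σ),
      a.foldl (fun s i => f s |i|) init = (a.map (fun i => |i|)).foldl f init := by
    intro σ f init; rw [List.foldl_map]
  set m := a.map (fun i => |i|) with hm
  -- A's dict is Counter(m)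
  have hdict : a.foldl (fun d i =>
      let k := |i|
      if d.contains k = false then d.insert k 1 else d.modify k 0 (· + 1))
      PySem.Dict.empty = PySem.Dict.counter m := by
    show a.foldl (fun d i =>
      if d.contains |i| = false then d.insert |i| 1 else d.modify |i| 0 (· + 1))
      PySem.Dict.empty = PySem.Dict.counter m
    rw [hmap (fun (d : PySem.Dict Int Int) k => if d.contains k = false then d.insert k 1 else d.modify k 0 (· + 1))]
    rw [PySem.Dict.counter_eq_foldl]
    congr 1
    funext d k
    exact stepA_eq_counter_step d k
  rw [hdict, PySem.Dict.items_counter]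
  rw [show (fun (result : List Int) (kv : Int × Int) =>
        if kv.2 > 1 then result ++ [kv.1] else result)
      = (fun result kv => if decide (kv.2 > 1) = true then result ++ [kv.1] else result) by
    funext r kv; by_cases h : kv.2 > 1 <;> simp [h]]
  rw [PySem.List.foldl_append_if]
  rw [hmap (fun (p : PySem.Set Int × PySem.Set Int) k =>
        if k ∈ p.1 then (p.1, PySem.Set.add p.2 k) else (PySem.Set.add p.1 k, p.2))]
  rw [hmap (fun (p : PySem.Set Int × List Int) k =>
        if k ∈ (m.foldl (fun p k => if k ∈ p.1 then (p.1, PySem.Set.add p.2 k)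
            else (PySem.Set.add p.1 k, p.2)) (PySem.Set.empty, PySem.Set.empty)).2 ∧ k ∉ p.1
          then (PySem.Set.add p.1 k, p.2 ++ [k]) else p)]
  rw [pass2_eq]
  simp only [List.nil_append, List.filter_map, List.map_map]
  rw [show ((fun (kv : Int × Int) => kv.1) ∘ fun k => (k, (List.count k m : Int)))
        = fun k => k from rfl, List.map_id']
  apply List.filter_congr
  intro k hkm
  have hk2 : k ∈ m := (PySem.Set.mem_ofList m k).mp hkm
  have hdup := mem_dup m PySem.Set.empty PySem.Set.empty k
  simp only [PySem.Set.empty, List.not_mem_nil, false_and, false_or] at hdup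
  by_cases hc : 2 ≤ m.count k
  · have : (1 : Int) < (List.count k m : Int) := by exact_mod_cast hc
    simp [hdup, hc, this, Function.comp]
  · have : ¬ (1 : Int) < (List.count k m : Int) := by
      intro h; exact hc (by exact_mod_cast h)
    simp [hdup, hc, this, Function.comp]
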